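-- pv_equiv track=rewrite | github.com/bagwanmisbah/DataSentience-AIML | src/Entertainment Industry/PredictiveDiceAI/src/core/game_engine.py | _has_three_pairs
-- ===== SOURCE A (Python) =====
-- from typing import List, Tuple, Dict, Optional, Callable
--
-- def _has_three_pairs(dice: Tuple[int, ...]) -> bool:
--     """Check if dice contain three pairs."""
--     if len(dice) != 6:
--         return False
--
--     value_counts = {}
--     for val in dice:
--         value_counts[val] = value_counts.get(val, 0) + 1
--
--     # Count pairs (values that appear 2 or more times)
--     pair_count = 0
--     for count in value_counts.values():
--         if count >= 2:
--             pair_count += 1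
--
--     return pair_count >= 3
-- ===== SOURCE B (Python) =====
-- def _has_three_pairs(dice) -> bool:
--     """Check if dice contain three pairs."""
--     if len(dice) != 6:
--         return False
--     a, b, c, d, e, f = sorted(dice)
--     # Three pairs of six dice means the sorted sequence is exactly v1 v1 v2 v2 v3 v3
--     # with v1 < v2 < v3 (three distinct values each appearing twice or more forces
--     # counts 2,2,2 since they sum to 6).
--     return a == b and c == d and e == f and b < c and d < e
-- ===== Notes on version B (the rewrite author's own statement) =====
-- stated objective: simpler
-- what changed: No frequency counting at all: B sorts the six dice and checks the closed positional pattern v1 v1 v2 v2 v3 v3 (adjacent equalities at positions 0-1, 2-3, 4-5 and strict inequalities between the blocks), which for exactly six dice is equivalent to having three distinct values with count >= 2.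
import Mathlib
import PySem

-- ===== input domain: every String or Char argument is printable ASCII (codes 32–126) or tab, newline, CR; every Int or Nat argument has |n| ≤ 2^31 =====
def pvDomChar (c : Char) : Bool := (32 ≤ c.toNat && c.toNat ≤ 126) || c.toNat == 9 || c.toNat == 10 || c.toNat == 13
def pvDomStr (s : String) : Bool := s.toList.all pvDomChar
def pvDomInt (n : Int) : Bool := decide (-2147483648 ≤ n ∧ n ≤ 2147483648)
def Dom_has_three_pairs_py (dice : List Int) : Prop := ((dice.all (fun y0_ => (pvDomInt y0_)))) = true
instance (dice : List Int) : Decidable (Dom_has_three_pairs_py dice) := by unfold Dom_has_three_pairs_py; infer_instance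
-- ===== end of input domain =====

-- B does no frequency counting: it sorts the six dice and checks the positional pattern
-- v1 v1 v2 v2 v3 v3 with strict jumps between blocks (simpler; same results).

-- ===== PORT A =====
def has_three_pairs_py (dice : List Int) : Bool :=
  if dice.length ≠ 6 then false
  else
    let value_counts := dice.foldl (fun d v => d.insert v (d.getD v 0 + 1)) (PySem.Dict.empty : PySem.Dict Int Int)
    let pair_count := value_counts.values.foldl (fun acc c => if c ≥ 2 then acc + 1 else acc) (0 : Int)
    decide (pair_count ≥ 3)

-- ===== PORT B =====
def has_three_pairs_py_alt (dice : List Int) : Bool :=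
  if dice.length ≠ 6 then false
  else
    match PySem.List.sorted dice (fun x => x) false with
    | [a, b, c, d, e, f] => a == b && c == d && e == f && decide (b < c) && decide (d < e)
    | _ => false

-- ===== PRECONDITION & SPEC =====
def Spec_has_three_pairs_py (dice : List Int) (out : Bool) : Prop := out = has_three_pairs_py_alt dice
instance (dice : List Int) (out : Bool) : Decidable (Spec_has_three_pairs_py dice out) := by unfold Spec_has_three_pairs_py; infer_instance

-- ===== CLAIM (what is proved, stated in full; the proofs are below) =====
def Claim_equal_has_three_pairs_py : Prop := ∀ (dice : List Int), Dom_has_three_pairs_py dice → Spec_has_three_pairs_py dice (has_three_pairs_py dice)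

-- ===== LEMMAS AND PROOFS =====

-- the common value: number of distinct dice values appearing at least twice
def pvPairish (l : List Int) : Finset Int := l.toFinset.filter (fun v => 2 ≤ l.count v)

theorem pv_foldl_if_countP (l : List Int) (n : Int) :
    l.foldl (fun acc c => if c ≥ 2 then acc + 1 else acc) n
      = n + (l.countP (fun c => decide (2 ≤ c)) : Int) := by
  induction l generalizing n with
  | nil => simp
  | cons a t ih =>
    by_cases h : (2:Int) ≤ a <;> simp [h, ih, ge_iff_le, Int.add_assoc, Int.add_comm 1]

-- countP over a nodup list with the members of `dice` is the cardinality of pvPairish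
theorem pv_countP_nodup (dice u : List Int) (hn : u.Nodup) (hm : ∀ v, v ∈ u ↔ v ∈ dice) :
    u.countP (fun v => decide (2 ≤ dice.count v)) = (pvPairish dice).card := by
  rw [List.countP_eq_length_filter]
  have hfn : (u.filter (fun v => decide (2 ≤ dice.count v))).Nodup := hn.filter _
  rw [← List.toFinset_card_of_nodup hfn]
  congr 1
  ext v
  simp [pvPairish, hm v]

-- Side A: the counter's pair count is the cardinality of pvPairish
theorem pv_A_count (dice : List Int) :
    ((dice.foldl (fun d v => d.insert v (d.getD v 0 + 1)) (PySem.Dict.empty : PySem.Dict Int Int)).values.countP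
      (fun c => decide (2 ≤ c))) = (pvPairish dice).card := by
  rw [PySem.Dict.foldl_insert_getD_add_one_eq_counter]
  show ((PySem.Dict.counter dice).items.map Prod.snd).countP (fun c => decide (2 ≤ c)) = _
  rw [PySem.Dict.items_counter, List.map_map, List.countP_map]
  rw [← pv_countP_nodup dice (PySem.Set.ofList dice) (PySem.Set.nodup_ofList dice)
        (PySem.Set.mem_ofList dice)]
  refine List.countP_congr ?_
  intro v _
  simp

theorem pv_pairish_perm (l m : List Int) (h : l.Perm m) : pvPairish l = pvPairish m := by
  unfold pvPairish
  rw [List.toFinset_eq_of_perm _ _ h]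
  refine Finset.filter_congr ?_
  intro v _
  simp [h.count_eq]

-- every value occurring in a 6-list with ≥ 3 pairish values occurs exactly twice
theorem pv_count_two (L : List Int) (hlen : L.length = 6)
    (h3 : 3 ≤ (pvPairish L).card) : ∀ v ∈ L, L.count v = 2 := by
  have hsum : ∑ v ∈ L.toFinset, L.count v = 6 := by
    have h := Multiset.toFinset_sum_count_eq (L : Multiset Int)
    simp only [Multiset.coe_count, Multiset.coe_card, List.toFinset_coe] at h
    rw [← hlen]; exact h
  have hsubP : pvPairish L ⊆ L.toFinset := Finset.filter_subset _ _
  have hge2 : ∀ v ∈ pvPairish L, 2 ≤ L.count v := by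
    intro v hv; exact (Finset.mem_filter.mp hv).2
  have hsplit : ∑ v ∈ L.toFinset \ pvPairish L, L.count v
      + ∑ v ∈ pvPairish L, L.count v = 6 := by
    rw [Finset.sum_sdiff hsubP]; exact hsum
  have hPsum_ge : 2 * (pvPairish L).card ≤ ∑ v ∈ pvPairish L, L.count v := by
    have := Finset.card_nsmul_le_sum (pvPairish L) (fun v => L.count v) 2 hge2
    simpa [smul_eq_mul, Nat.mul_comm] using this
  have hdiff_ge : (L.toFinset \ pvPairish L).card
      ≤ ∑ v ∈ L.toFinset \ pvPairish L, L.count v := by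
    have := Finset.card_nsmul_le_sum (L.toFinset \ pvPairish L) (fun v => L.count v) 1
      (fun v hv => List.count_pos_iff.mpr
        (List.mem_toFinset.mp (Finset.mem_sdiff.mp hv).1))
    simpa [smul_eq_mul] using this
  have hcard3 : (pvPairish L).card = 3 := by omega
  have hsumP : ∑ v ∈ pvPairish L, L.count v = 6 := by omega
  have hdiff0 : (L.toFinset \ pvPairish L).card = 0 := by omega
  have hallmem : ∀ v ∈ L, v ∈ pvPairish L := by
    intro v hv
    have hvt : v ∈ L.toFinset := List.mem_toFinset.mpr hv
    by_contra hvP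
    have : v ∈ L.toFinset \ pvPairish L := Finset.mem_sdiff.mpr ⟨hvt, hvP⟩
    have := Finset.card_eq_zero.mp hdiff0 ▸ this
    simp at this
  intro v hvL
  have hvP := hallmem v hvL
  by_contra hne
  have h3le : 3 ≤ L.count v := by have := hge2 v hvP; omega
  have hadd : L.count v + ∑ w ∈ (pvPairish L).erase v, L.count w = 6 := by
    rw [Finset.add_sum_erase (pvPairish L) (fun w => L.count w) hvP]; exact hsumP
  have herase_ge : 2 * ((pvPairish L).erase v).card
      ≤ ∑ w ∈ (pvPairish L).erase v, L.count w := by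
    have := Finset.card_nsmul_le_sum ((pvPairish L).erase v) (fun w => L.count w) 2
      (fun w hw => hge2 w (Finset.mem_of_mem_erase hw))
    simpa [smul_eq_mul, Nat.mul_comm] using this
  have hcerase : ((pvPairish L).erase v).card = 2 := by
    rw [Finset.card_erase_of_mem hvP, hcard3]
  omega

-- for a sorted 6-list, "≥ 3 pairish values" is exactly the positional pattern v1 v1 v2 v2 v3 v3
theorem pv_six_iff (a b c d e f : Int) (h1 : a ≤ b) (h2 : b ≤ c) (h3 : c ≤ d)
    (h4 : d ≤ e) (h5 : e ≤ f) :
    3 ≤ (pvPairish [a, b, c, d, e, f]).card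
      ↔ (a = b ∧ c = d ∧ e = f ∧ b < c ∧ d < e) := by
  constructor
  · intro h3c
    have hex2 := pv_count_two [a, b, c, d, e, f] (by simp) h3c
    have hab : a = b := by
      by_contra hne
      have hc1 : List.count a [a, b, c, d, e, f] = 1 := by
        simp only [List.count_cons, List.count_nil, beq_iff_eq]
        split_ifs <;> omega
      have := hex2 a (by simp); omega
    subst hab
    have hbc : a < c := by
      by_contra hnlt
      have hca : c = a := by omega
      have hc3 : 3 ≤ List.count a [a, a, c, d, e, f] := by
        simp only [List.count_cons, List.count_nil, beq_iff_eq]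
        split_ifs <;> omega
      have := hex2 a (by simp); omega
    have hcd : c = d := by
      by_contra hne
      have hc1 : List.count c [a, a, c, d, e, f] = 1 := by
        simp only [List.count_cons, List.count_nil, beq_iff_eq]
        split_ifs <;> omega
      have := hex2 c (by simp); omega
    subst hcd
    have hde : c < e := by
      by_contra hnlt
      have hec : e = c := by omega
      have hc3 : 3 ≤ List.count c [a, a, c, c, e, f] := by
        simp only [List.count_cons, List.count_nil, beq_iff_eq]
        split_ifs <;> omega
      have := hex2 c (by simp); omega
    have hef : e = f := by
      by_contra hne
      have hc1 : List.count f [a, a, c, c, e, f] = 1 := by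
        simp only [List.count_cons, List.count_nil, beq_iff_eq]
        split_ifs <;> omega
      have := hex2 f (by simp); omega
    exact ⟨rfl, rfl, hef, hbc, hde⟩
  · rintro ⟨hab, hcd, hef, hbc, hde⟩
    subst hab; subst hcd; subst hef
    have hsub : ({a, c, e} : Finset Int) ⊆ pvPairish [a, a, c, c, e, e] := by
      intro v hv
      simp only [Finset.mem_insert, Finset.mem_singleton] at hv
      simp only [pvPairish, Finset.mem_filter, List.mem_toFinset]
      rcases hv with rfl | rfl | rfl
      · refine ⟨by simp, ?_⟩
        simp only [List.count_cons, List.count_nil, beq_iff_eq]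
        split_ifs <;> omega
      · refine ⟨by simp, ?_⟩
        simp only [List.count_cons, List.count_nil, beq_iff_eq]
        split_ifs <;> omega
      · refine ⟨by simp, ?_⟩
        simp only [List.count_cons, List.count_nil, beq_iff_eq]
        split_ifs <;> omega
    have hcard : ({a, c, e} : Finset Int).card = 3 := by
      simp [show a ≠ c by omega, show a ≠ e by omega, show c ≠ e by omega]
    calc 3 = ({a, c, e} : Finset Int).card := hcard.symm
      _ ≤ _ := Finset.card_le_card hsub

-- Bool form used by the verdict proof
theorem pv_six (a b c d e f : Int) (h1 : a ≤ b) (h2 : b ≤ c) (h3 : c ≤ d)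
    (h4 : d ≤ e) (h5 : e ≤ f) :
    decide (3 ≤ (pvPairish [a, b, c, d, e, f]).card)
      = (a == b && c == d && e == f && decide (b < c) && decide (d < e)) := by
  simp only [Bool.beq_eq_decide_eq]
  rw [show (decide (a = b) && decide (c = d) && decide (e = f) && decide (b < c) && decide (d < e))
        = decide (a = b ∧ c = d ∧ e = f ∧ b < c ∧ d < e) from by simp [Bool.and_assoc],
      decide_eq_decide]
  exact pv_six_iff a b c d e f h1 h2 h3 h4 h5

-- ===== VERDICT (by name: the statement is the Claim_ definition above) =====
theorem has_three_pairs_py_spec : Claim_equal_has_three_pairs_py := by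
  intro dice _
  unfold Spec_has_three_pairs_py has_three_pairs_py has_three_pairs_py_alt
  by_cases h6 : dice.length ≠ 6
  · simp [h6]
  · simp only [h6, if_false]
    have hperm := PySem.List.sorted_perm dice (fun x => x) false
    have hpw : (PySem.List.sorted dice (fun x => x) false).Pairwise (· ≤ ·) := by
      simpa using PySem.List.sorted_pairwise dice (fun x => x)
    have hlen : (PySem.List.sorted dice (fun x => x) false).length = 6 := by
      rw [hperm.length_eq]; omega
    match hs : PySem.List.sorted dice (fun x => x) false, hlen with
    | [a, b, c, d, e, f], _ =>
      rw [hs] at hperm hpw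
      simp only [List.pairwise_cons, List.mem_cons, List.not_mem_nil] at hpw
      show decide _ = (a == b && c == d && e == f && decide (b < c) && decide (d < e))
      rw [pv_foldl_if_countP, pv_A_count, pv_pairish_perm dice _ hperm.symm,
          ← pv_six a b c d e f (hpw.1 b (by simp)) (hpw.2.1 c (by simp))
            (hpw.2.2.1 d (by simp)) (hpw.2.2.2.1 e (by simp)) (hpw.2.2.2.2.1 f (by simp))]
      rw [decide_eq_decide]
      omega
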